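-- pv_equiv track=rewrite | github.com/AlvieSpurlock/MathCore | MathCore/MathTypes/Advanced/Topology.py | IsTopology
-- ===== SOURCE A (Python) =====
-- import itertools   # combinations, product
--
-- def _fs(s):
--     """Convert any iterable to frozenset."""
--     return frozenset(s)
--
-- def _union(sets):
--     result = set()
--     for s in sets: result |= set(s)
--     return _fs(result)
--
-- def IsTopology(points, open_sets):
--     X    = _fs(points)
--     oss  = [_fs(o) for o in open_sets]
--     oss_set = set(oss)
--
--     has_empty = _fs([]) in oss_set                             # ∅ must be open
--     has_whole = X in oss_set                                   # X must be open
--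
--     # Check closure under finite intersections (of non-empty pairs)
--     intersect_closed = True
--     for a, b in itertools.combinations(oss, 2):
--         if _fs(a & b) not in oss_set:
--             intersect_closed = False
--             break
--
--     # Check closure under arbitrary unions (all subsets of oss)
--     union_closed = True
--     for r in range(1, len(oss) + 1):
--         for combo in itertools.combinations(oss, r):
--             u = _union(combo)
--             if u not in oss_set:
--                 union_closed = False
--                 break
--         if not union_closed:
--             break
--
--     is_top = has_empty and has_whole and union_closed and intersect_closed
--     return is_top, has_empty, has_whole, union_closed, intersect_closed
-- ===== SOURCE B (Python) =====
-- def IsTopology(points, open_sets):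
--     X = frozenset(points)
--     oss = [frozenset(o) for o in open_sets]
--     opens = set(oss)
--
--     has_empty = frozenset() in opens
--     has_whole = X in opens
--
--     # Closure under pairwise unions is equivalent to closure under all
--     # finite (non-empty) unions, so only all ordered pairs are checked.
--     union_closed = all(a | b in opens for a in oss for b in oss)
--     intersect_closed = all(a & b in opens for a in oss for b in oss)
--
--     is_top = has_empty and has_whole and union_closed and intersect_closed
--     return is_top, has_empty, has_whole, union_closed, intersect_closed
-- ===== Notes on version B (the rewrite author's own statement) =====
-- stated objective: faster
-- what changed: A checks union-closure by enumerating every non-empty subset of the open sets (itertools.combinations for every r); B checks only all ordered pairs a|b, which is equivalent because closure under pairwise unions implies closure under all finite unions, and drops itertools entirely.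
import Mathlib
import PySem

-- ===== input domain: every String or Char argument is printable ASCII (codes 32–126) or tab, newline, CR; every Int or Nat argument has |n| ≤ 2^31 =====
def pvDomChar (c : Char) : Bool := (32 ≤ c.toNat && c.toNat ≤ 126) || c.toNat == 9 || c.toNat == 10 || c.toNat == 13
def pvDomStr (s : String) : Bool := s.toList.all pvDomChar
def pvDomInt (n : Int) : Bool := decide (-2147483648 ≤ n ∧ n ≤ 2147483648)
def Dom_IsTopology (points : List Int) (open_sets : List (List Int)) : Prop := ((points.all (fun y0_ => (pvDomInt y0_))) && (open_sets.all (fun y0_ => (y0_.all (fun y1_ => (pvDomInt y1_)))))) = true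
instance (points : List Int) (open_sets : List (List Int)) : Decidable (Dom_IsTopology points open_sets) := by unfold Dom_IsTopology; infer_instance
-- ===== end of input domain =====

-- B replaces A's enumeration of all non-empty subsets in the union-closure check by a check
-- over ordered pairs only (faster); the equivalence of the two checks is proved below.

-- A frozenset of ints is modelled by its canonical (strictly increasing, duplicate-free)
-- element list, so that list equality is exactly Python's frozenset equality.
def fsCanon (l : List Int) : List Int := PySem.List.sorted (PySem.Set.ofList l) (fun x => x) false

-- ===== PORT A =====
-- itertools.combinations(l, 2), as a list of pairs in itertools order
def pvPairs (l : List (List Int)) : List (List Int × List Int) :=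
  match l with
  | [] => []
  | x :: xs => (xs.map (fun y => (x, y))) ++ pvPairs xs

-- itertools.combinations(l, r), in itertools order
def pvCombos (r : Nat) (l : List (List Int)) : List (List (List Int)) :=
  match r, l with
  | 0, _ => [[]]
  | _ + 1, [] => []
  | r + 1, x :: xs => (pvCombos r xs).map (fun c => x :: c) ++ pvCombos (r + 1) xs

-- _union(sets): 'result = set(); for s in sets: result |= set(s); return frozenset(result)'
def pvUnionFold (sets : List (List Int)) : List Int :=
  fsCanon (sets.foldl (fun res s => PySem.Set.update res s) [])

def IsTopology (points : List Int) (open_sets : List (List Int)) : Bool × Bool × Bool × Bool × Bool :=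
  let X := fsCanon points
  let oss := open_sets.map fsCanon
  let ossSet : PySem.Set (List Int) := PySem.Set.ofList oss
  let hasEmpty := PySem.Set.contains ossSet []
  let hasWhole := PySem.Set.contains ossSet X
  let intersectClosed :=
    (pvPairs oss).all (fun p => PySem.Set.contains ossSet (fsCanon (PySem.Set.inter p.1 p.2)))
  let unionClosed :=
    (PySem.List.pyRange 1 ((oss.length : Int) + 1) 1).all
      (fun r => (pvCombos r.toNat oss).all
        (fun combo => PySem.Set.contains ossSet (pvUnionFold combo)))
  let isTop := hasEmpty && hasWhole && unionClosed && intersectClosed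
  (isTop, hasEmpty, hasWhole, unionClosed, intersectClosed)

-- ===== PORT B =====
def IsTopology_alt (points : List Int) (open_sets : List (List Int)) : Bool × Bool × Bool × Bool × Bool :=
  let X := fsCanon points
  let oss := open_sets.map fsCanon
  let opens : PySem.Set (List Int) := PySem.Set.ofList oss
  let hasEmpty := PySem.Set.contains opens []
  let hasWhole := PySem.Set.contains opens X
  let unionClosed :=
    oss.all (fun a => oss.all (fun b => PySem.Set.contains opens (fsCanon (PySem.Set.union a b))))
  let intersectClosed :=
    oss.all (fun a => oss.all (fun b => PySem.Set.contains opens (fsCanon (PySem.Set.inter a b))))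
  let isTop := hasEmpty && hasWhole && unionClosed && intersectClosed
  (isTop, hasEmpty, hasWhole, unionClosed, intersectClosed)

-- ===== PRECONDITION & SPEC =====
def Spec_IsTopology (points : List Int) (open_sets : List (List Int)) (out : Bool × Bool × Bool × Bool × Bool) : Prop := out = IsTopology_alt points open_sets
instance (points : List Int) (open_sets : List (List Int)) (out : Bool × Bool × Bool × Bool × Bool) : Decidable (Spec_IsTopology points open_sets out) := by unfold Spec_IsTopology; infer_instance

-- ===== CLAIM (what is proved, stated in full; the proofs are below) =====
def Claim_equal_IsTopology : Prop := ∀ (points : List Int) (open_sets : List (List Int)), Dom_IsTopology points open_sets → Spec_IsTopology points open_sets (IsTopology points open_sets)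

-- ===== LEMMAS AND PROOFS =====

theorem mem_fsCanon (x : Int) (l : List Int) : x ∈ fsCanon l ↔ x ∈ l := by
  simp [fsCanon, PySem.List.mem_sorted, PySem.Set.mem_ofList]

theorem fsCanon_pairwise (l : List Int) : (fsCanon l).Pairwise (· < ·) :=
  PySem.List.sorted_ofList_pairwise_lt l

-- a finite set of ints has exactly one canonical element list
theorem canon_unique (l₁ l₂ : List Int) (h₁ : l₁.Pairwise (· < ·)) (h₂ : l₂.Pairwise (· < ·))
    (h : ∀ x, x ∈ l₁ ↔ x ∈ l₂) : l₁ = l₂ := by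
  have n₁ : l₁.Nodup := h₁.imp (fun {a b} h => ne_of_lt h)
  have n₂ : l₂.Nodup := h₂.imp (fun {a b} h => ne_of_lt h)
  have hp : l₁.Perm l₂ := (List.perm_ext_iff_of_nodup n₁ n₂).mpr h
  exact hp.eq_of_pairwise (fun a b _ _ hab hba => absurd hba (not_lt.mpr hab.le)) h₁ h₂

theorem mem_pvPairs (l : List (List Int)) (a b : List Int) (h : (a, b) ∈ pvPairs l) :
    a ∈ l ∧ b ∈ l := by
  induction l with
  | nil => simp [pvPairs] at h
  | cons x xs ih =>
    simp only [pvPairs, List.mem_append, List.mem_map] at h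
    rcases h with ⟨y, hy, he⟩ | h
    · obtain ⟨rfl, rfl⟩ := Prod.mk.injEq .. ▸ And.intro (congrArg Prod.fst he) (congrArg Prod.snd he)
      exact ⟨List.mem_cons_self, List.mem_cons_of_mem _ hy⟩
    · exact ⟨List.mem_cons_of_mem _ (ih h).1, List.mem_cons_of_mem _ (ih h).2⟩

theorem pair_cases (l : List (List Int)) (a b : List Int) (ha : a ∈ l) (hb : b ∈ l) :
    a = b ∨ (a, b) ∈ pvPairs l ∨ (b, a) ∈ pvPairs l := by
  induction l with
  | nil => simp at ha
  | cons x xs ih =>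
    rcases List.mem_cons.mp ha with rfl | ha'
    · rcases List.mem_cons.mp hb with rfl | hb'
      · exact Or.inl rfl
      · exact Or.inr (Or.inl (by simp [pvPairs]; exact Or.inl hb'))
    · rcases List.mem_cons.mp hb with rfl | hb'
      · exact Or.inr (Or.inr (by simp [pvPairs]; exact Or.inl ha'))
      · rcases ih ha' hb' with h | h | h
        · exact Or.inl h
        · exact Or.inr (Or.inl (by simp [pvPairs, h]))
        · exact Or.inr (Or.inr (by simp [pvPairs, h]))

-- itertools.combinations(l, r) enumerates exactly the length-r sublists of l
theorem mem_pvCombos (r : Nat) (l : List (List Int)) (c : List (List Int)) :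
    c ∈ pvCombos r l ↔ c.Sublist l ∧ c.length = r := by
  induction l generalizing r c with
  | nil =>
    cases r with
    | zero => simp [pvCombos, List.sublist_nil]
    | succ r => simp [pvCombos]; intro h; subst h; simp
  | cons x xs ih =>
    cases r with
    | zero =>
      simp [pvCombos, List.length_eq_zero_iff]
      intro h; subst h; exact List.nil_sublist _
    | succ r =>
      simp only [pvCombos, List.mem_append, List.mem_map, ih]
      constructor
      · rintro (⟨c', ⟨hs, hlen⟩, rfl⟩ | ⟨hs, hlen⟩)
        · exact ⟨List.cons_sublist_cons.mpr hs, by simp [hlen]⟩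
        · exact ⟨hs.cons _, hlen⟩
      · rintro ⟨hs, hlen⟩
        rcases List.sublist_cons_iff.mp hs with h | ⟨c', rfl, hc'⟩
        · exact Or.inr ⟨h, hlen⟩
        · exact Or.inl ⟨c', ⟨hc', by simpa using hlen⟩, rfl⟩

theorem pair_sublist (l : List (List Int)) (a b : List Int) (ha : a ∈ l) (hb : b ∈ l)
    (hne : a ≠ b) : [a, b].Sublist l ∨ [b, a].Sublist l := by
  induction l with
  | nil => simp at ha
  | cons x xs ih =>
    rcases List.mem_cons.mp ha with rfl | ha'
    · have hb' : b ∈ xs := by rcases List.mem_cons.mp hb with rfl | h; exact absurd rfl hne; exact h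
      exact Or.inl (List.cons_sublist_cons.mpr (List.singleton_sublist.mpr hb'))
    · rcases List.mem_cons.mp hb with rfl | hb'
      · exact Or.inr (List.cons_sublist_cons.mpr (List.singleton_sublist.mpr ha'))
      · rcases ih ha' hb' with h | h
        · exact Or.inl (h.cons _)
        · exact Or.inr (h.cons _)

theorem mem_foldl_update (cs : List (List Int)) (init : List Int) (x : Int) :
    x ∈ cs.foldl (fun res s => PySem.Set.update res s) init ↔ x ∈ init ∨ ∃ s ∈ cs, x ∈ s := by
  induction cs generalizing init with
  | nil => simp
  | cons c cs ih => simp [ih, PySem.Set.mem_update, or_assoc]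

theorem mem_pvUnionFold (cs : List (List Int)) (x : Int) :
    x ∈ pvUnionFold cs ↔ ∃ s ∈ cs, x ∈ s := by
  simp [pvUnionFold, mem_fsCanon, mem_foldl_update]

-- the intersection parts of A and B coincide on a list of canonical sets
theorem inter_part_eq (l : List (List Int)) (hl : ∀ s ∈ l, s.Pairwise (· < ·)) :
    ((pvPairs l).all (fun p =>
        PySem.Set.contains (PySem.Set.ofList l) (fsCanon (PySem.Set.inter p.1 p.2))))
    = (l.all (fun a => l.all (fun b =>
        PySem.Set.contains (PySem.Set.ofList l) (fsCanon (PySem.Set.inter a b))))) := by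
  rw [Bool.eq_iff_iff]
  simp only [List.all_eq_true, PySem.Set.contains_iff, PySem.Set.mem_ofList]
  constructor
  · intro H a ha b hb
    rcases pair_cases l a b ha hb with rfl | h | h
    · have : fsCanon (PySem.Set.inter a a) = a :=
        canon_unique _ _ (fsCanon_pairwise _) (hl a ha)
          (by intro x; simp [mem_fsCanon, PySem.Set.mem_inter])
      rw [this]; exact ha
    · exact H _ h
    · have : fsCanon (PySem.Set.inter a b) = fsCanon (PySem.Set.inter b a) :=
        canon_unique _ _ (fsCanon_pairwise _) (fsCanon_pairwise _)
          (by intro x; simp only [mem_fsCanon, PySem.Set.mem_inter]; tauto)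
      rw [this]; exact H _ h
  · intro H p hp
    exact H p.1 (mem_pvPairs l p.1 p.2 hp).1 p.2 (mem_pvPairs l p.1 p.2 hp).2

-- the union parts of A and B coincide on a list of canonical sets: closure under all
-- non-empty subset unions is closure under all pairwise unions
theorem union_part_eq (l : List (List Int)) (hl : ∀ s ∈ l, s.Pairwise (· < ·)) :
    ((PySem.List.pyRange 1 ((l.length : Int) + 1) 1).all
      (fun r => (pvCombos r.toNat l).all
        (fun combo => PySem.Set.contains (PySem.Set.ofList l) (pvUnionFold combo))))
    = (l.all (fun a => l.all (fun b =>
        PySem.Set.contains (PySem.Set.ofList l) (fsCanon (PySem.Set.union a b))))) := by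
  rw [Bool.eq_iff_iff]
  simp only [List.all_eq_true, PySem.Set.contains_iff, PySem.Set.mem_ofList,
    PySem.List.mem_pyRange_one, mem_pvCombos]
  have key : (∀ c : List (List Int), c.Sublist l → c ≠ [] → pvUnionFold c ∈ l) ↔
      (∀ a ∈ l, ∀ b ∈ l, fsCanon (PySem.Set.union a b) ∈ l) := by
    constructor
    · intro K a ha b hb
      by_cases hab : a = b
      · subst hab
        have : fsCanon (PySem.Set.union a a) = a :=
          canon_unique _ _ (fsCanon_pairwise _) (hl a ha)
            (by intro x; simp [mem_fsCanon, PySem.Set.mem_union])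
        rw [this]; exact ha
      · rcases pair_sublist l a b ha hb hab with h | h
        · have : fsCanon (PySem.Set.union a b) = pvUnionFold [a, b] :=
            canon_unique _ _ (fsCanon_pairwise _) (fsCanon_pairwise _)
              (by intro x; simp [mem_fsCanon, mem_pvUnionFold, PySem.Set.mem_union])
          rw [this]; exact K _ h (by simp)
        · have : fsCanon (PySem.Set.union a b) = pvUnionFold [b, a] :=
            canon_unique _ _ (fsCanon_pairwise _) (fsCanon_pairwise _)
              (by intro x; simp [mem_fsCanon, mem_pvUnionFold, PySem.Set.mem_union, or_comm])
          rw [this]; exact K _ h (by simp)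
    · intro H c
      induction c with
      | nil => intro _ h; exact absurd rfl h
      | cons a c ih =>
        intro hs _
        have ha : a ∈ l := hs.subset List.mem_cons_self
        cases c with
        | nil =>
          have : pvUnionFold [a] = a :=
            canon_unique _ _ (fsCanon_pairwise _) (hl a ha)
              (by intro x; simp [mem_pvUnionFold])
          rw [this]; exact ha
        | cons b c' =>
          have hu : pvUnionFold (b :: c') ∈ l :=
            ih (List.sublist_of_cons_sublist hs) (by simp)
          have : pvUnionFold (a :: b :: c') = fsCanon (PySem.Set.union a (pvUnionFold (b :: c'))) :=
            canon_unique _ _ (fsCanon_pairwise _) (fsCanon_pairwise _)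
              (by intro x
                  simp [mem_pvUnionFold, mem_fsCanon, PySem.Set.mem_union])
          rw [this]; exact H a ha _ hu
  constructor
  · intro H a ha b hb
    refine (key.mp ?_) a ha b hb
    intro c hs hne
    have hlen : 1 ≤ c.length := by
      cases c; exact absurd rfl hne; simp
    have hle : c.length ≤ l.length := hs.length_le
    have := H (c.length : Int) ⟨by exact_mod_cast hlen, by exact_mod_cast Nat.lt_succ_of_le hle⟩ c
    simp at this
    exact this hs
  · intro H r hr c hc
    refine key.mpr H c hc.1 ?_
    intro hnil
    subst hnil
    simp at hc
    omega

-- ===== VERDICT (by name: the statement is the Claim_ definition above) =====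
theorem IsTopology_spec : Claim_equal_IsTopology := by
  intro points open_sets _
  simp only [Spec_IsTopology, IsTopology, IsTopology_alt]
  have hl : ∀ s ∈ open_sets.map fsCanon, s.Pairwise (· < ·) := by
    intro s hs
    rcases List.mem_map.mp hs with ⟨t, _, rfl⟩
    exact fsCanon_pairwise t
  rw [union_part_eq _ hl, inter_part_eq _ hl]
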